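-- pv_equiv track=rewrite | github.com/pwwang/datar | datar/core/utils.py | dict_insert_at
-- ===== SOURCE A (Python) =====
-- from typing import (
--     Any,
--     Callable,
--     Iterable,
--     List,
--     Mapping,
--     Sequence,
--     Union,
--     Tuple,
-- )
--
-- def dict_insert_at(
--     container: Mapping[str, Any],
--     poskeys: Sequence[str],
--     value: Mapping[str, Any],
--     remove: bool = False,
-- ) -> Mapping[str, Any]:
--     """Insert value to a certain position of a dict"""
--     ret_items = []  # type: List[Tuple[str, Any]]
--     ret_items_append = ret_items.append
--     matched = False
--     for key, val in container.items():
--         if key == poskeys[0]: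
--             matched = True
--             if not remove:
--                 ret_items_append((key, val))
--             ret_items.extend(value.items())
--         elif matched and key in poskeys:
--             if not remove:
--                 ret_items_append((key, val))
--         elif matched and key not in poskeys:
--             matched = False
--             ret_items_append((key, val))
--         else:
--             ret_items_append((key, val))
--
--     return dict(ret_items)
-- ===== SOURCE B (Python) =====
-- def dict_insert_at(container, poskeys, value, remove=False):
--     """Insert value to a certain position of a dict"""
--     items = list(container.items())
--     idx = None
--     if items:
--         p0 = poskeys[0]
--         for i, (k, _) in enumerate(items):
--             if k == p0:
--                 idx = i
--                 break
--     if idx is None: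
--         return dict(items)
--     j = idx + 1
--     n = len(items)
--     while j < n and items[j][0] in poskeys:
--         j += 1
--     region = items[:idx]
--     if not remove:
--         region.append(items[idx])
--     region.extend(value.items())
--     if not remove:
--         region.extend(items[idx + 1:j])
--     region.extend(items[j:])
--     return dict(region)
-- ===== Notes on version B (the rewrite author's own statement) =====
-- stated objective: alternative
-- what changed: Replaces A's running matched-flag state machine with per-item appends by an index-based region assembly: find the position of poskeys[0], delimit the contiguous run of poskeys-members after it with one forward scan, and concatenate container slices with the inserted value.
import Mathlib
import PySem

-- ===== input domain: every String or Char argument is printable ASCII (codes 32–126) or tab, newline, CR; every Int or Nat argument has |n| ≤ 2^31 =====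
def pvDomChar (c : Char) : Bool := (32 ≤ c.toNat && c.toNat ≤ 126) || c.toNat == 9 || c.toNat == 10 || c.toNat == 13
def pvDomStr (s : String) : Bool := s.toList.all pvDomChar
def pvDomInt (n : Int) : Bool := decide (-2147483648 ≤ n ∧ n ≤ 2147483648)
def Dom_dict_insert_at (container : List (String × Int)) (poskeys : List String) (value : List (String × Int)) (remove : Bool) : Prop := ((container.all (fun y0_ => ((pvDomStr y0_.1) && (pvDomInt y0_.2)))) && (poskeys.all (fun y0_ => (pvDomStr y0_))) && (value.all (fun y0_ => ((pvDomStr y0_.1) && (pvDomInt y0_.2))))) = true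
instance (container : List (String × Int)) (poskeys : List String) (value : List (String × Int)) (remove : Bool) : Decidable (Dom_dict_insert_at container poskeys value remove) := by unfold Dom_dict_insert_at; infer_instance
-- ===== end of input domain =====

-- B replaces A's matched-flag state machine by an index-computed split and region assembly (objective: alternative, same cost).

-- ===== PORT A =====
-- A's for-loop over container.items() with the running `matched` flag; ret_items is built
-- item by item exactly as in the Python (value.items() spliced in after the matching key).
def pvLoopA (poskeys : List String) (value : List (String × Int)) (remove : Bool) :
    Bool → List (String × Int) → List (String × Int)
  | _, [] => []
  | matched, (k, v) :: rest =>
    if PySem.List.pyGet? poskeys 0 = some k then          -- key == poskeys[0] (IndexError when poskeys = [] is excluded by Pre_)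
      (if remove then [] else [(k, v)]) ++ value ++ pvLoopA poskeys value remove true rest
    else if matched && decide (k ∈ poskeys) then
      (if remove then [] else [(k, v)]) ++ pvLoopA poskeys value remove true rest
    else if matched && !decide (k ∈ poskeys) then
      (k, v) :: pvLoopA poskeys value remove false rest
    else
      (k, v) :: pvLoopA poskeys value remove matched rest

def dict_insert_at (container : List (String × Int)) (poskeys : List String) (value : List (String × Int)) (remove : Bool) : List (String × Int) :=
  (PySem.Dict.ofList (pvLoopA poskeys value remove false container)).items   -- dict(ret_items)

-- ===== PORT B =====
-- B's region assembly once idx (first position of p0) is known: slices of items around idx,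
-- the contiguous run of poskeys-members after idx (the while loop), and the tail.
def pvRegion (poskeys : List String) (value : List (String × Int)) (remove : Bool) (p0 : String) (items : List (String × Int)) : List (String × Int) :=
  match items.findIdx? (fun kv => kv.1 == p0) with
  | none => items
  | some idx =>
      items.take idx
        ++ (if remove then [] else (items.drop idx).take 1)
        ++ value
        ++ (if remove then [] else (items.drop (idx + 1)).takeWhile (fun kv => decide (kv.1 ∈ poskeys)))
        ++ (items.drop (idx + 1)).dropWhile (fun kv => decide (kv.1 ∈ poskeys))

def dict_insert_at_alt (container : List (String × Int)) (poskeys : List String) (value : List (String × Int)) (remove : Bool) : List (String × Int) :=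
  let region :=
    if container.isEmpty then container
    else
      match poskeys.head? with
      | none => container        -- Python B raises IndexError (poskeys[0]) here; excluded by Pre_
      | some p0 => pvRegion poskeys value remove p0 container
  (PySem.Dict.ofList region).items

-- ===== PRECONDITION & SPEC =====
-- Pre_ excludes (a) poskeys = [] with a non-empty container, where A (and B) raise IndexError, and
-- (b) container lists with duplicate keys, which do not arise from a Python dict argument (A's
-- Mapping input cannot carry them) and on which A would splice value at every repeated match.
def Pre_dict_insert_at (container : List (String × Int)) (poskeys : List String) (value : List (String × Int)) (remove : Bool) : Prop :=
  (container.map Prod.fst).Nodup ∧ (container = [] ∨ poskeys ≠ [])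
instance (container : List (String × Int)) (poskeys : List String) (value : List (String × Int)) (remove : Bool) : Decidable (Pre_dict_insert_at container poskeys value remove) := by unfold Pre_dict_insert_at; infer_instance

def pvWitness_dict_insert_at : (List (String × Int)) × List String × (List (String × Int)) × Bool :=
  ([("a", 1), ("b", 2)], ["a"], [("x", 9)], false)

def Spec_dict_insert_at (container : List (String × Int)) (poskeys : List String) (value : List (String × Int)) (remove : Bool) (out : List (String × Int)) : Prop := out = dict_insert_at_alt container poskeys value remove
instance (container : List (String × Int)) (poskeys : List String) (value : List (String × Int)) (remove : Bool) (out : List (String × Int)) : Decidable (Spec_dict_insert_at container poskeys value remove out) := by unfold Spec_dict_insert_at; infer_instance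

-- ===== CLAIM (what is proved, stated in full; the proofs are below) =====
def Claim_equal_dict_insert_at : Prop := ∀ (container : List (String × Int)) (poskeys : List String) (value : List (String × Int)) (remove : Bool), Dom_dict_insert_at container poskeys value remove → Pre_dict_insert_at container poskeys value remove → Spec_dict_insert_at container poskeys value remove (dict_insert_at container poskeys value remove)

-- ===== LEMMAS AND PROOFS =====

-- With matched = false and no key equal to poskeys[0], A's loop copies the list.
theorem pvLoopA_copy (poskeys : List String) (value : List (String × Int)) (remove : Bool) (p0 : String)
    (h0 : poskeys.head? = some p0) (l : List (String × Int)) (hl : ∀ kv ∈ l, kv.1 ≠ p0) :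
    pvLoopA poskeys value remove false l = l := by
  induction l with
  | nil => rfl
  | cons kv rest ih =>
    obtain ⟨k, v⟩ := kv
    have hk : k ≠ p0 := hl (k, v) (List.mem_cons_self)
    have hget : PySem.List.pyGet? poskeys 0 = some p0 := by
      cases poskeys with
      | nil => simp at h0
      | cons a t => simp at h0; simp [PySem.List.pyGet?, PySem.List.pyIdx?, h0]
    simp only [pvLoopA, hget]
    rw [if_neg (by simp [hk.symm]), if_neg (by simp), if_neg (by simp)]
    exact congrArg _ (ih (fun kv h => hl kv (List.mem_cons_of_mem _ h)))

-- With matched = true and no key equal to poskeys[0], A's loop keeps (unless remove) the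
-- leading run of poskeys-members and then copies the rest.
theorem pvLoopA_run (poskeys : List String) (value : List (String × Int)) (remove : Bool) (p0 : String)
    (h0 : poskeys.head? = some p0) (l : List (String × Int)) (hl : ∀ kv ∈ l, kv.1 ≠ p0) :
    pvLoopA poskeys value remove true l =
      (if remove then [] else l.takeWhile (fun kv => decide (kv.1 ∈ poskeys)))
        ++ l.dropWhile (fun kv => decide (kv.1 ∈ poskeys)) := by
  induction l with
  | nil => simp [pvLoopA]
  | cons kv rest ih =>
    obtain ⟨k, v⟩ := kv
    have hk : k ≠ p0 := hl (k, v) (List.mem_cons_self)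
    have hrest : ∀ kv ∈ rest, kv.1 ≠ p0 := fun kv h => hl kv (List.mem_cons_of_mem _ h)
    have hget : PySem.List.pyGet? poskeys 0 = some p0 := by
      cases poskeys with
      | nil => simp at h0
      | cons a t => simp at h0; simp [PySem.List.pyGet?, PySem.List.pyIdx?, h0]
    by_cases hmem : k ∈ poskeys
    · simp only [pvLoopA, hget]
      rw [if_neg (by simp [hk.symm]), if_pos (by simp [hmem])]
      rw [ih hrest]
      by_cases hr : remove <;> simp [List.takeWhile_cons, List.dropWhile_cons, hmem, hr]
    · simp only [pvLoopA, hget]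
      rw [if_neg (by simp [hk.symm]), if_neg (by simp [hmem]), if_pos (by simp [hmem])]
      rw [pvLoopA_copy poskeys value remove p0 h0 rest hrest]
      by_cases hr : remove <;> simp [List.takeWhile_cons, List.dropWhile_cons, hmem, hr]

-- Main invariant: on a duplicate-free container, A's loop from matched = false produces
-- exactly B's region assembly.
theorem pvLoopA_eq_region (poskeys : List String) (value : List (String × Int)) (remove : Bool) (p0 : String)
    (h0 : poskeys.head? = some p0) (l : List (String × Int)) (hnd : (l.map Prod.fst).Nodup) :
    pvLoopA poskeys value remove false l = pvRegion poskeys value remove p0 l := by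
  induction l with
  | nil => rfl
  | cons kv rest ih =>
    obtain ⟨k, v⟩ := kv
    have hget : PySem.List.pyGet? poskeys 0 = some p0 := by
      cases poskeys with
      | nil => simp at h0
      | cons a t => simp at h0; simp [PySem.List.pyGet?, PySem.List.pyIdx?, h0]
    have hnd' : (rest.map Prod.fst).Nodup := by simpa using hnd.of_cons
    by_cases hk : k = p0
    · -- first item matches: idx = 0
      subst hk
      have hrest : ∀ kv ∈ rest, kv.1 ≠ k := by
        intro kvp h hkv
        have hnd2 : (k :: rest.map Prod.fst).Nodup := by simpa using hnd
        exact (List.nodup_cons.mp hnd2).1 (List.mem_map.mpr ⟨kvp, h, hkv⟩)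
      simp only [pvLoopA, hget, if_pos rfl]
      rw [pvLoopA_run poskeys value remove k h0 rest hrest]
      have hfind : ((k, v) :: rest).findIdx? (fun kv => kv.1 == k) = some 0 := by
        simp [List.findIdx?_cons]
      simp only [pvRegion, hfind]
      by_cases hr : remove <;> simp [hr]
    · simp only [pvLoopA, hget]
      rw [if_neg (by simp; exact fun h => hk h.symm), if_neg (by simp), if_neg (by simp)]
      rw [ih hnd']
      simp only [pvRegion, List.findIdx?_cons]
      rw [if_neg (by simp [hk])]
      cases hfind : rest.findIdx? (fun kv => kv.1 == p0) with
      | none => simp [hfind]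
      | some i => simp [hfind]

-- ===== VERDICT (by name: the statement is the Claim_ definition above) =====
theorem dict_insert_at_spec : Claim_equal_dict_insert_at := by
  intro container poskeys value remove _ hpre
  obtain ⟨hnd, hcase⟩ := hpre
  unfold Spec_dict_insert_at dict_insert_at dict_insert_at_alt
  rcases hcase with hc | hp
  · subst hc; rfl
  · cases hpk : poskeys with
    | nil => exact absurd hpk hp
    | cons p0 ps =>
      subst hpk
      cases container with
      | nil => rfl
      | cons kv rest =>
        simp only [List.isEmpty_cons, List.head?_cons, Bool.false_eq_true, if_false]
        exact congrArg (fun l => (PySem.Dict.ofList l).items)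
          (pvLoopA_eq_region (p0 :: ps) value remove p0 rfl (kv :: rest) hnd)
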